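-- pv_equiv track=rewrite | github.com/raeez/chiral-bar-cobar | compute/lib/bc_gross_zagier_shadow_engine.py | l_series_coefficients
-- ===== SOURCE A (Python) =====
-- def primes_up_to(n):
--     """Sieve of Eratosthenes."""
--     if n < 2:
--         return []
--     sieve = [True] * (n + 1)
--     sieve[0] = sieve[1] = False
--     for i in range(2, int(n**0.5) + 1):
--         if sieve[i]:
--             for j in range(i*i, n + 1, i):
--                 sieve[j] = False
--     return [i for i in range(2, n + 1) if sieve[i]]
--
-- def elliptic_curve_ap(a_coeff, b_coeff, p):
--     """Compute a_p = p + 1 - #E(F_p) for E: y^2 = x^3 + a*x + b over F_p.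
--
--     Direct point counting (suitable for p < 10^5).
--     """
--     p = int(p)
--     if p < 2:
--         return 0
--     count = 0
--     a_int = int(round(a_coeff)) % p
--     b_int = int(round(b_coeff)) % p
--     for x in range(p):
--         rhs = (x * x * x + a_int * x + b_int) % p
--         if rhs == 0:
--             count += 1  # point (x, 0)
--         else:
--             # Euler criterion
--             leg = pow(rhs, (p - 1) // 2, p)
--             if leg == 1:
--                 count += 2  # two points (x, +-y)
--     # Add point at infinity
--     count += 1
--     return p + 1 - count
--
-- def l_series_coefficients(a_coeff, b_coeff, num_terms=1000):
--     """Compute the first num_terms Dirichlet coefficients a_n of L(E, s).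
--
--     For a prime p: a_p = p + 1 - #E(F_p).
--     For prime powers and composites: use multiplicativity.
--     """
--     primes = primes_up_to(num_terms)
--     a = [0] * (num_terms + 1)
--     a[1] = 1
--
--     # Compute a_p for each prime
--     ap_cache = {}
--     for p in primes:
--         ap = elliptic_curve_ap(a_coeff, b_coeff, p)
--         ap_cache[p] = ap
--         a[p] = ap
--
--     # Compute a_{p^k} for prime powers
--     for p in primes:
--         pk = p * p
--         while pk <= num_terms:
--             # a_{p^k} = a_p * a_{p^{k-1}} - p * a_{p^{k-2}} (for good reduction)
--             prev = pk // p
--             pprev = prev // p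
--             a[pk] = ap_cache[p] * a[prev] - p * a[pprev]
--             pk *= p
--
--     # Multiplicativity: a_{mn} = a_m * a_n for gcd(m,n) = 1
--     for n in range(2, num_terms + 1):
--         if a[n] != 0:
--             continue
--         # Factor n and use multiplicativity
--         temp = n
--         val = 1
--         for p in primes:
--             if p * p > temp:
--                 break
--             if temp % p == 0:
--                 pk = 1
--                 while temp % p == 0:
--                     pk *= p
--                     temp //= p
--                 val *= a[pk]
--         if temp > 1:
--             val *= a[temp]
--         a[n] = val
--
--     return a
-- ===== SOURCE B (Python) =====
-- def _ap_char_sum(a_coeff, b_coeff, p):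
--     """a_p = -sum_x chi(x^3+ax+b) over F_p, chi the quadratic character (Euler criterion)."""
--     a = a_coeff % p
--     b = b_coeff % p
--     s = 0
--     for x in range(p):
--         r = (x * x * x + a * x + b) % p
--         if r != 0:
--             s += 1 if pow(r, (p - 1) // 2, p) == 1 else -1
--     return -s
--
-- def l_series_coefficients(a_coeff, b_coeff, num_terms=1000):
--     """First num_terms Dirichlet coefficients a_n of L(E, s).
--
--     Single forward pass over n = 2..num_terms: find the smallest prime factor p
--     of n by trial division, strip its full power p^k out of n, then either
--     count points at the new prime (character sum), apply the Hecke recurrence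
--     at a prime power, or multiply two already-computed coefficients.
--     No sieve, no prime list, no separate phases.
--     """
--     a = [0] * (num_terms + 1)
--     a[1] = 1
--     for n in range(2, num_terms + 1):
--         p = 2
--         while p * p <= n and n % p != 0:
--             p += 1
--         if p * p > n:
--             p = n
--         pk, m = p, n // p
--         while m % p == 0:
--             pk, m = pk * p, m // p
--         if m > 1:
--             a[n] = a[pk] * a[m]                       # multiplicativity
--         elif pk == p:
--             a[n] = _ap_char_sum(a_coeff, b_coeff, p)  # n is prime
--         else:
--             a[n] = a[p] * a[n // p] - p * a[n // (p * p)]  # Hecke recurrence at p^k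
--     return a
-- ===== Notes on version B (the rewrite author's own statement) =====
-- stated objective: alternative
-- what changed: A's four phases (Eratosthenes sieve, per-prime point count with branch-counting, prime-power recurrence pass, trial-division composite pass) are replaced by one forward pass that trial-divides each n for its smallest prime factor and either evaluates a quadratic-character sum (at a new prime), applies the Hecke recurrence (at a prime power) or multiplies two earlier coefficients (composite); no sieve, prime list or cache remains.
import Mathlib
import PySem

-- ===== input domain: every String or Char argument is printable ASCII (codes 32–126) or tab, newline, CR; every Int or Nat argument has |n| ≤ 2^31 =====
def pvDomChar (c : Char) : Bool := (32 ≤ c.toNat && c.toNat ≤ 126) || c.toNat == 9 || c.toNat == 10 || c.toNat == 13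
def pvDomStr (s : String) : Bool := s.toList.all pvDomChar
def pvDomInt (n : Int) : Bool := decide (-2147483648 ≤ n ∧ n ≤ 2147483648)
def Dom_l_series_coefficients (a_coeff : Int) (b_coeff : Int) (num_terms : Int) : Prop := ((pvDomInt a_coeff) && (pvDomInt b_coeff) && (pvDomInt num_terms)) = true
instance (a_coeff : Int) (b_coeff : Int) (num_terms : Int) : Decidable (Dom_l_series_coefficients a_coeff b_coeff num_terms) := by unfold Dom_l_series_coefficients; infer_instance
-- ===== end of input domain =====

-- B replaces A's four staged passes (sieve, per-prime point count, prime-power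
-- recurrence pass, trial-division composite pass) by one forward pass that
-- factors each n by its smallest prime factor and evaluates a quadratic
-- character sum at new primes (objective: alternative algorithm, equal values).

-- ===== PORT A =====
-- int(n**0.5) is ported as Nat.sqrt: exact for 0 ≤ n ≤ 2^31 (double sqrt is exact there)
def primesUpTo (n : Int) : List Int :=
  if n < 2 then []
  else
    let sieve := ((List.replicate (n.toNat + 1) true).set 0 false).set 1 false
    let sieve := (PySem.List.pyRange 2 ((Nat.sqrt n.toNat : Int) + 1) 1).foldl
      (fun s i =>
        if s.getD i.toNat false then
          (PySem.List.pyRange (i * i) (n + 1) i).foldl (fun s j => s.set j.toNat false) s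
        else s) sieve
    (PySem.List.pyRange 2 (n + 1) 1).filter (fun i => sieve.getD i.toNat false)

-- pow(rhs, (p-1)//2, p) is PySem.Int.powMod; list indices here are always in range,
-- so a[i] / a[i] = v are ported as getD / set
def ellipticCurveAp (a_coeff b_coeff p : Int) : Int :=
  if p < 2 then 0
  else
    let a_int := PySem.Int.mod a_coeff p
    let b_int := PySem.Int.mod b_coeff p
    let count := (PySem.List.pyRange 0 p 1).foldl (fun count x =>
      let rhs := PySem.Int.mod (x * x * x + a_int * x + b_int) p
      if rhs = 0 then count + 1
      else if PySem.Int.powMod rhs (PySem.Int.floordiv (p - 1) 2).toNat p = 1 then count + 2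
      else count) 0
    let count := count + 1
    p + 1 - count

-- 'while pk <= num_terms: ... pk *= p' (fuel-totalised; fuel num_terms+1 is always
-- enough since pk at least doubles each turn)
def ppWhile (num_terms p ap : Int) (pk : Int) (a : List Int) : Nat → List Int
  | 0 => a
  | fuel + 1 =>
    if pk ≤ num_terms then
      let prev := PySem.Int.floordiv pk p
      let pprev := PySem.Int.floordiv prev p
      ppWhile num_terms p ap (pk * p) (a.set pk.toNat (ap * a.getD prev.toNat 0 - p * a.getD pprev.toNat 0)) fuel
    else a

-- A's first three phases: a = [0]*(num_terms+1); a[1] = 1; the a_p pass (with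
-- ap_cache) and the prime-power pass
def baseFill (a_coeff b_coeff num_terms : Int) (primes : List Int) : PySem.Dict Int Int × List Int :=
  let a := (List.replicate (num_terms.toNat + 1) (0 : Int)).set 1 1
  let st := primes.foldl (fun (st : PySem.Dict Int Int × List Int) p =>
      let ap := ellipticCurveAp a_coeff b_coeff p
      (st.1.insert p ap, st.2.set p.toNat ap)) (PySem.Dict.empty, a)
  (st.1, primes.foldl (fun a p => ppWhile num_terms p (st.1.getD p 0) (p * p) a (num_terms.toNat + 1)) st.2)

-- A's 'while temp % p == 0: pk *= p; temp //= p' (fuel-totalised)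
def stripLoop (p : Int) (pk temp : Int) : Nat → Int × Int
  | 0 => (pk, temp)
  | fuel + 1 =>
    if PySem.Int.mod temp p = 0 then stripLoop p (pk * p) (PySem.Int.floordiv temp p) fuel
    else (pk, temp)

-- A's 'for p in primes: if p*p > temp: break; ...' factoring loop
def trialLoop (a : List Int) (ps : List Int) (temp val : Int) (fuel : Nat) : Int × Int :=
  match ps with
  | [] => (temp, val)
  | p :: ps =>
    if p * p > temp then (temp, val)
    else if PySem.Int.mod temp p = 0 then
      let r := stripLoop p 1 temp fuel
      trialLoop a ps r.2 (val * a.getD r.1.toNat 0) fuel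
    else trialLoop a ps temp val fuel

def l_series_coefficients (a_coeff : Int) (b_coeff : Int) (num_terms : Int) : List Int :=
  let primes := primesUpTo num_terms
  let a := (baseFill a_coeff b_coeff num_terms primes).2
  (PySem.List.pyRange 2 (num_terms + 1) 1).foldl (fun a n =>
    if a.getD n.toNat 0 ≠ 0 then a
    else
      let r := trialLoop a primes n 1 num_terms.toNat
      let val := if r.1 > 1 then r.2 * a.getD r.1.toNat 0 else r.2
      a.set n.toNat val) a

-- ===== PORT B =====
-- a_p = -sum_x chi(x^3+ax+b), chi the quadratic character via Euler's criterion
def apCharSum (a_coeff b_coeff p : Int) : Int :=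
  let a_int := PySem.Int.mod a_coeff p
  let b_int := PySem.Int.mod b_coeff p
  let s := (PySem.List.pyRange 0 p 1).foldl (fun s x =>
    let r := PySem.Int.mod (x * x * x + a_int * x + b_int) p
    if r ≠ 0 then s + (if PySem.Int.powMod r (PySem.Int.floordiv (p - 1) 2).toNat p = 1 then 1 else -1)
    else s) 0;
  -s

-- 'p = 2; while p*p <= n and n % p != 0: p += 1' (fuel-totalised; fuel n is enough
-- since p never exceeds n)
def spfFind (n : Int) (p : Int) : Nat → Int
  | 0 => p
  | fuel + 1 =>
    if p * p ≤ n ∧ PySem.Int.mod n p ≠ 0 then spfFind n (p + 1) fuel else p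

-- 'while m % p == 0: pk, m = pk*p, m//p' (fuel-totalised)
def bStrip (p : Int) (pk m : Int) : Nat → Int × Int
  | 0 => (pk, m)
  | fuel + 1 =>
    if PySem.Int.mod m p = 0 then bStrip p (pk * p) (PySem.Int.floordiv m p) fuel
    else (pk, m)

def l_series_coefficients_alt (a_coeff : Int) (b_coeff : Int) (num_terms : Int) : List Int :=
  let a := (List.replicate (num_terms.toNat + 1) (0 : Int)).set 1 1
  (PySem.List.pyRange 2 (num_terms + 1) 1).foldl (fun a n =>
    let p0 := spfFind n 2 n.toNat
    let p := if p0 * p0 > n then n else p0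
    let r := bStrip p p (PySem.Int.floordiv n p) num_terms.toNat
    let v :=
      if r.2 > 1 then a.getD r.1.toNat 0 * a.getD r.2.toNat 0
      else if r.1 = p then apCharSum a_coeff b_coeff p
      else a.getD p.toNat 0 * a.getD (PySem.Int.floordiv n p).toNat 0
             - p * a.getD (PySem.Int.floordiv n (p * p)).toNat 0
    a.set n.toNat v) a

-- ===== PRECONDITION & SPEC =====
-- A raises IndexError (a[1] = 1 on a list of length num_terms+1 ≤ 1) iff num_terms < 1
def Pre_l_series_coefficients (a_coeff : Int) (b_coeff : Int) (num_terms : Int) : Prop :=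
  1 ≤ num_terms
instance (a_coeff : Int) (b_coeff : Int) (num_terms : Int) : Decidable (Pre_l_series_coefficients a_coeff b_coeff num_terms) := by unfold Pre_l_series_coefficients; infer_instance

def pvWitness_l_series_coefficients : Int × Int × Int := (1, 1, 6)

def Spec_l_series_coefficients (a_coeff : Int) (b_coeff : Int) (num_terms : Int) (out : List Int) : Prop := out = l_series_coefficients_alt a_coeff b_coeff num_terms
instance (a_coeff : Int) (b_coeff : Int) (num_terms : Int) (out : List Int) : Decidable (Spec_l_series_coefficients a_coeff b_coeff num_terms out) := by unfold Spec_l_series_coefficients; infer_instance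

-- ===== CLAIM (what is proved, stated in full; the proofs are below) =====
def Claim_equal_l_series_coefficients : Prop := ∀ (a_coeff : Int) (b_coeff : Int) (num_terms : Int), Dom_l_series_coefficients a_coeff b_coeff num_terms → Pre_l_series_coefficients a_coeff b_coeff num_terms → Spec_l_series_coefficients a_coeff b_coeff num_terms (l_series_coefficients a_coeff b_coeff num_terms)

-- ===== LEMMAS AND PROOFS =====
-- range-fold induction
theorem pyRange_foldl_ind {σ : Type} (f : σ → Int → σ) (lo : Int) (Inv : Int → σ → Prop)
    (hi : Int) (a : σ) (hlo : lo ≤ hi) (hbase : Inv lo a)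
    (hstep : ∀ j s, lo ≤ j → j < hi → Inv j s → Inv (j + 1) (f s j)) :
    Inv hi ((PySem.List.pyRange lo hi 1).foldl f a) := by
  have h : ∀ (k : Nat) (hi : Int), hi - lo = k → lo ≤ hi →
      (∀ j s, lo ≤ j → j < hi → Inv j s → Inv (j + 1) (f s j)) →
      Inv hi ((PySem.List.pyRange lo hi 1).foldl f a) := by
    intro k
    induction k with
    | zero =>
      intro hi hk hle _
      have : hi = lo := by omega
      subst this
      simpa [PySem.List.pyRange_one_eq_nil le_rfl] using hbase
    | succ k ih =>
      intro hi hk hle hstep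
      have h1 : lo ≤ hi - 1 := by omega
      have hdec : PySem.List.pyRange lo hi 1 = PySem.List.pyRange lo (hi - 1) 1 ++ [hi - 1] := by
        have := PySem.List.pyRange_one_succ_right (a := lo) (b := hi - 1) h1
        simpa [sub_add_cancel] using this
      rw [hdec, List.foldl_append]
      have := hstep (hi - 1) ((PySem.List.pyRange lo (hi-1) 1).foldl f a) h1 (by omega)
        (ih (hi - 1) (by omega) h1 (fun j s hj1 hj2 hs => hstep j s hj1 (by omega) hs))
      simpa using this
  exact h (hi - lo).toNat hi (by omega) hlo hstep

-- fold of constant sets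
theorem getD_foldl_set_const {α : Type} (v d : α) :
    ∀ (js : List Int) (init : List α) (m : Nat), (∀ j ∈ js, 0 ≤ j) →
      (js.foldl (fun s j => s.set j.toNat v) init).getD m d =
        if (m : Int) ∈ js ∧ m < init.length then v else init.getD m d := by
  intro js
  induction js with
  | nil => intro init m _; simp
  | cons j js ih =>
    intro init m hnn
    have hj : 0 ≤ j := hnn j (by simp)
    rw [List.foldl_cons, ih _ m (fun x hx => hnn x (by simp [hx]))]
    simp only [List.length_set, List.getD_eq_getElem?_getD, List.getElem?_set, List.mem_cons]
    by_cases hjm : j.toNat = m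
    · have hj2 : j = (m : Int) := by omega
      by_cases hlen : m < init.length
      · simp [hjm, hj2, hlen]
      · simp only [hjm, if_pos rfl, if_neg hlen]
        have : ¬ ((↑m = j ∨ (m:Int) ∈ js) ∧ m < init.length) := by tauto
        have h2 : ¬ ((m:Int) ∈ js ∧ m < init.length) := by tauto
        simp [this, h2, List.getElem?_eq_none (by omega : init.length ≤ m)]
    · have hj2 : ¬ (↑m = j) := by omega
      simp only [if_neg hjm]
      by_cases hmem : (m:Int) ∈ js <;> simp [hmem, hj2]

-- mathematical mirror of the strip loops: (p^v, n / p^v) with v the exact multiplicity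
def pstrip (p : Nat) (n : Nat) : Nat × Nat :=
  if h : 2 ≤ p ∧ p ∣ n ∧ n ≠ 0 then
    let r := pstrip p (n / p)
    (p * r.1, r.2)
  else (1, n)
  termination_by n
  decreasing_by exact Nat.div_lt_self (Nat.pos_of_ne_zero h.2.2) (by omega)

theorem pstrip_mul (p n : Nat) : (pstrip p n).1 * (pstrip p n).2 = n := by
  induction n using Nat.strong_induction_on with
  | _ n ih =>
    rw [pstrip]
    split_ifs with h
    · have hlt : n / p < n := Nat.div_lt_self (Nat.pos_of_ne_zero h.2.2) (by omega)
      have := ih (n / p) hlt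
      simp only [mul_assoc, this]
      exact (Nat.mul_div_cancel' h.2.1)
    · simp

theorem pstrip_not_dvd (p n : Nat) (hp : 2 ≤ p) (hn : n ≠ 0) : ¬ p ∣ (pstrip p n).2 := by
  induction n using Nat.strong_induction_on with
  | _ n ih =>
    rw [pstrip]
    split_ifs with h
    · have hlt : n / p < n := Nat.div_lt_self (Nat.pos_of_ne_zero h.2.2) (by omega)
      have hne : n / p ≠ 0 := by
        have := Nat.le_of_dvd (Nat.pos_of_ne_zero hn) h.2.1
        have := Nat.div_pos this (by omega)
        omega
      exact ih (n / p) hlt hne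
    · simp only
      intro hd
      exact h ⟨hp, hd, hn⟩

theorem pstrip_fst_pow (p n : Nat) (hp : 2 ≤ p) : ∃ k, (pstrip p n).1 = p ^ k ∧ (p ∣ n → n ≠ 0 → 1 ≤ k) := by
  induction n using Nat.strong_induction_on with
  | _ n ih =>
    rw [pstrip]
    split_ifs with h
    · have hlt : n / p < n := Nat.div_lt_self (Nat.pos_of_ne_zero h.2.2) (by omega)
      obtain ⟨k, hk, _⟩ := ih (n / p) hlt
      exact ⟨k + 1, by simp [hk, pow_succ, mul_comm], by omega⟩
    · exact ⟨0, by simp, fun hd hn => absurd ⟨hp, hd, hn⟩ h⟩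

theorem pstrip_snd_pos (p n : Nat) (hn : n ≠ 0) : (pstrip p n).2 ≠ 0 := by
  intro h
  have := pstrip_mul p n
  rw [h, mul_zero] at this
  exact hn this.symm

theorem pstrip_snd_lt (p n : Nat) (hp : 2 ≤ p) (hd : p ∣ n) (hn : 2 ≤ n) : (pstrip p n).2 < n := by
  have hmul := pstrip_mul p n
  obtain ⟨k, hk, hk1⟩ := pstrip_fst_pow p n hp
  have h1 : 1 ≤ k := hk1 hd (by omega)
  have hfst : 2 ≤ (pstrip p n).1 := by
    rw [hk]
    calc 2 ≤ p := hp
    _ = p ^ 1 := (pow_one p).symm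
    _ ≤ p ^ k := Nat.pow_le_pow_right (by omega) h1
  have hsnd := pstrip_snd_pos p n (by omega)
  nlinarith [Nat.pos_of_ne_zero hsnd]

theorem pstrip_prime_pow (q k : Nat) (hq : q.Prime) (hk : 1 ≤ k) : pstrip q (q ^ k) = (q ^ k, 1) := by
  induction k with
  | zero => omega
  | succ k ih =>
    rw [pstrip]
    have hq2 : 2 ≤ q := hq.two_le
    have hne : q ^ (k+1) ≠ 0 := by positivity
    rw [dif_pos ⟨hq2, dvd_pow_self q (by omega), hne⟩]
    have hdiv : q ^ (k + 1) / q = q ^ k := by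
      rw [pow_succ]; exact Nat.mul_div_left _ (by omega)
    by_cases hk0 : k = 0
    · subst hk0
      simp only [hdiv, pow_zero]
      rw [pstrip]
      have : ¬ (2 ≤ q ∧ q ∣ 1 ∧ (1:Nat) ≠ 0) := by
        rintro ⟨_, hd, _⟩
        have := Nat.le_of_dvd one_pos hd
        omega
      rw [dif_neg this]
      simp [pow_succ]
    · have := ih (by omega)
      rw [hdiv, this]
      simp [pow_succ, mul_comm]

theorem stripLoop_eq (p : Nat) (hp : 2 ≤ p) :
    ∀ (fuel t : Nat) (pk0 : Int), 1 ≤ t → t ≤ fuel →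
      stripLoop (p : Int) pk0 (t : Int) fuel = (pk0 * ((pstrip p t).1 : Int), ((pstrip p t).2 : Int)) := by
  intro fuel
  induction fuel with
  | zero => intro t pk0 h1 h2; omega
  | succ fuel ih =>
    intro t pk0 h1 h2
    rw [stripLoop]
    by_cases hd : p ∣ t
    · have hmod : PySem.Int.mod (t : Int) (p : Int) = 0 := by
        rw [PySem.Int.mod_eq_zero_iff_dvd]
        exact_mod_cast hd
      rw [if_pos hmod, PySem.Int.floordiv_natCast]
      have htp : 1 ≤ t / p := Nat.div_pos (Nat.le_of_dvd (by omega) hd) (by omega)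
      have htp2 : t / p ≤ fuel := by
        have : t / p < t := Nat.div_lt_self (by omega) (by omega)
        omega
      rw [ih (t / p) (pk0 * p) htp htp2]
      conv_rhs => rw [pstrip]
      rw [dif_pos ⟨hp, hd, by omega⟩]
      simp only
      push_cast
      ring_nf
    · have hmod : ¬ PySem.Int.mod (t : Int) (p : Int) = 0 := by
        rw [PySem.Int.mod_eq_zero_iff_dvd]
        exact_mod_cast hd
      rw [if_neg hmod]
      conv_rhs => rw [pstrip]
      rw [dif_neg (by tauto)]
      simp

theorem bStrip_eq (p : Nat) (hp : 2 ≤ p) :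
    ∀ (fuel t : Nat) (pk0 : Int), 1 ≤ t → t ≤ fuel →
      bStrip (p : Int) pk0 (t : Int) fuel = (pk0 * ((pstrip p t).1 : Int), ((pstrip p t).2 : Int)) := by
  intro fuel
  induction fuel with
  | zero => intro t pk0 h1 h2; omega
  | succ fuel ih =>
    intro t pk0 h1 h2
    rw [bStrip]
    by_cases hd : p ∣ t
    · have hmod : PySem.Int.mod (t : Int) (p : Int) = 0 := by
        rw [PySem.Int.mod_eq_zero_iff_dvd]
        exact_mod_cast hd
      rw [if_pos hmod, PySem.Int.floordiv_natCast]
      have htp : 1 ≤ t / p := Nat.div_pos (Nat.le_of_dvd (by omega) hd) (by omega)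
      have htp2 : t / p ≤ fuel := by
        have : t / p < t := Nat.div_lt_self (by omega) (by omega)
        omega
      rw [ih (t / p) (pk0 * p) htp htp2]
      conv_rhs => rw [pstrip]
      rw [dif_pos ⟨hp, hd, by omega⟩]
      simp only
      push_cast
      ring_nf
    · have hmod : ¬ PySem.Int.mod (t : Int) (p : Int) = 0 := by
        rw [PySem.Int.mod_eq_zero_iff_dvd]
        exact_mod_cast hd
      rw [if_neg hmod]
      conv_rhs => rw [pstrip]
      rw [dif_neg (by tauto)]
      simp

def IsPP (m : Nat) : Prop := ∃ p k, Nat.Prime p ∧ 1 ≤ k ∧ m = p ^ k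

-- the multiplicative completion: value at n determined by the base array's values at prime powers
def Fc (a0 : List Int) (n : Nat) : Int :=
  if h : n < 2 then 1
  else a0.getD (pstrip n.minFac n).1 0 * Fc a0 (pstrip n.minFac n).2
  termination_by n
  decreasing_by
    exact pstrip_snd_lt n.minFac n (Nat.minFac_prime (by omega)).two_le (Nat.minFac_dvd n) (by omega)

theorem Fc_one (a0 : List Int) : Fc a0 1 = 1 := by rw [Fc]; simp
theorem Fc_lt_two (a0 : List Int) (n : Nat) (h : n < 2) : Fc a0 n = 1 := by rw [Fc]; simp [h]

theorem Fc_pp (a0 : List Int) (m : Nat) (h : IsPP m) : Fc a0 m = a0.getD m 0 := by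
  obtain ⟨p, k, hp, hk, rfl⟩ := h
  have h2 : 2 ≤ p ^ k := by
    calc 2 ≤ p := hp.two_le
    _ = p ^ 1 := (pow_one p).symm
    _ ≤ p ^ k := Nat.pow_le_pow_right (by have := hp.two_le; omega) hk
  rw [Fc, dif_neg (by omega)]
  rw [hp.pow_minFac (by omega), pstrip_prime_pow p k hp hk]
  simp [Fc_one]

theorem IsPP_two_le (m : Nat) (h : IsPP m) : 2 ≤ m := by
  obtain ⟨p, k, hp, hk, rfl⟩ := h
  calc 2 ≤ p := hp.two_le
  _ = p ^ 1 := (pow_one p).symm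
  _ ≤ p ^ k := Nat.pow_le_pow_right (by have := hp.two_le; omega) hk

theorem IsPP_pstrip_fst (q n : Nat) (hq : q.Prime) (hd : q ∣ n) (hn : n ≠ 0) : IsPP (pstrip q n).1 := by
  obtain ⟨k, hk, h1⟩ := pstrip_fst_pow q n hq.two_le
  exact ⟨q, k, hq, h1 hd hn, hk⟩

-- unfolding step of Fc at a general n ≥ 2
theorem Fc_step (a0 : List Int) (n : Nat) (h : 2 ≤ n) :
    Fc a0 n = a0.getD (pstrip n.minFac n).1 0 * Fc a0 (pstrip n.minFac n).2 := by
  rw [Fc, dif_neg (by omega)]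

theorem length_foldl_set_const {α : Type} (v : α) (js : List Int) (init : List α) :
    (js.foldl (fun s j => s.set j.toNat v) init).length = init.length := by
  induction js generalizing init with
  | nil => rfl
  | cons j js ih => simp [ih]

theorem primesUpTo_mem (N : Nat) (x : Int) :
    x ∈ primesUpTo (N : Int) ↔ ∃ m : Nat, x = (m : Int) ∧ m.Prime ∧ m ≤ N := by
  by_cases hN : (N : Int) < 2
  · rw [primesUpTo, if_pos hN]
    simp only [List.not_mem_nil, false_iff]
    rintro ⟨m, rfl, hp, hle⟩
    have := hp.two_le
    omega
  · rw [primesUpTo, if_neg hN]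
    have hN2 : 2 ≤ N := by omega
    simp only [Int.toNat_natCast]
    set s := Nat.sqrt N with hs
    set sieve0 := ((List.replicate (N + 1) true).set 0 false).set 1 false with hsv0
    have hlen0 : sieve0.length = N + 1 := by simp [hsv0]
    set Inv : Int → List Bool → Prop := fun i sv =>
      sv.length = N + 1 ∧ ∀ m : Nat, m ≤ N →
        (sv.getD m false = true ↔ 2 ≤ m ∧ ∀ d : Nat, 2 ≤ d → (d : Int) < i → d * d ≤ m → ¬ d ∣ m)
      with hInv
    have hfin : Inv ((s : Int) + 1)
        ((PySem.List.pyRange 2 ((s : Int) + 1) 1).foldl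
          (fun sv i =>
            if sv.getD i.toNat false then
              (PySem.List.pyRange (i * i) ((N : Int) + 1) i).foldl (fun s j => s.set j.toNat false) sv
            else sv) sieve0) := by
      refine pyRange_foldl_ind _ 2 Inv ((s : Int) + 1) sieve0 ?_ ?_ ?_
      · have : 1 ≤ s := by
          rw [hs]
          have := (Nat.le_sqrt (m := 1) (n := N)).mpr (by omega)
          omega
        omega
      · -- base
        refine ⟨hlen0, ?_⟩
        intro m hm
        constructor
        · intro ht
          refine ⟨?_, fun d hd1 hd2 _ _ => by omega⟩
          by_contra hm2
          interval_cases m <;>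
            simp [hsv0, List.getD_eq_getElem?_getD, List.getElem?_set,
              List.getElem?_replicate, (by omega : 0 < N)] at ht
        · rintro ⟨hm2, -⟩
          simp only [hsv0, List.getD_eq_getElem?_getD, List.getElem?_set]
          rw [if_neg (by omega), if_neg (by omega)]
          simp [List.getElem?_replicate, (by omega : m < N + 1)]
      · -- step
        intro j sv hj1 hj2 ⟨hlen, hinv⟩
        set jN := j.toNat with hjN
        have hjcast : (jN : Int) = j := by omega
        have hjN2 : 2 ≤ jN := by omega
        have hjNs : jN ≤ s := by omega
        have hjj : jN * jN ≤ N := by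
          calc jN * jN ≤ s * s := Nat.mul_le_mul hjNs hjNs
          _ ≤ N := by have := Nat.sqrt_le' N; rw [hs]; nlinarith
        have hmark : ∀ m : Nat, m ≤ N →
            (((m : Int) ∈ PySem.List.pyRange (j * j) ((N : Int) + 1) j ∧ m < sv.length)
              ↔ (jN * jN ≤ m ∧ jN ∣ m)) := by
          intro m hm
          rw [PySem.List.mem_pyRange_iff_of_pos (by omega : (0:Int) < j)]
          constructor
          · rintro ⟨⟨h1, h2, h3⟩, -⟩
            have hdvd : j ∣ (m : Int) := by
              have hjj2 : j ∣ (j * j : Int) := Dvd.intro j rfl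
              have := dvd_add h3 hjj2
              simpa using this
            constructor
            · have : ((jN * jN : Nat) : Int) ≤ (m : Int) := by push_cast [hjcast]; exact h1
              exact_mod_cast this
            · rw [← hjcast] at hdvd
              exact_mod_cast hdvd
          · rintro ⟨h1, h2⟩
            refine ⟨⟨?_, by omega, ?_⟩, by omega⟩
            · have : ((jN * jN : Nat) : Int) ≤ (m : Int) := by exact_mod_cast h1
              push_cast [hjcast] at this
              exact this
            · have hdvd : (jN : Int) ∣ (m : Int) := Int.natCast_dvd_natCast.mpr h2
              rw [hjcast] at hdvd
              exact dvd_sub hdvd (Dvd.intro j rfl)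
        have hrhs : ∀ m : Nat,
            ((∀ d : Nat, 2 ≤ d → (d : Int) < j + 1 → d * d ≤ m → ¬ d ∣ m)
              ↔ (∀ d : Nat, 2 ≤ d → (d : Int) < j → d * d ≤ m → ¬ d ∣ m) ∧
                (jN * jN ≤ m → ¬ jN ∣ m)) := by
          intro m
          constructor
          · intro h
            exact ⟨fun d h1 h2 h3 => h d h1 (by omega) h3,
              fun hle => h jN hjN2 (by omega) hle⟩
          · rintro ⟨h1, h2⟩ d hd1 hd2 hd3 hd4
            by_cases hdj : (d : Int) < j
            · exact h1 d hd1 hdj hd3 hd4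
            · have : d = jN := by omega
              subst this
              exact h2 hd3 hd4
        by_cases hsv : sv.getD jN false
        · rw [if_pos hsv]
          refine ⟨by rw [length_foldl_set_const]; exact hlen, ?_⟩
          intro m hm
          rw [getD_foldl_set_const false false _ sv m (by
            intro y hy
            rw [PySem.List.mem_pyRange_iff_of_pos (by omega)] at hy
            nlinarith [hy.1])]
          rw [hrhs m]
          constructor
          · intro h
            by_cases hc : ((m : Int) ∈ PySem.List.pyRange (j * j) ((N : Int) + 1) j ∧ m < sv.length)
            · rw [if_pos hc] at h; exact absurd h (by simp)
            · rw [if_neg hc] at h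
              obtain ⟨h2m, hall⟩ := (hinv m hm).mp h
              rw [hmark m hm] at hc
              exact ⟨h2m, hall, fun ha hb => hc ⟨ha, hb⟩⟩
          · rintro ⟨h2m, hall, hnew⟩
            rw [if_neg (by
              rw [hmark m hm]
              rintro ⟨ha, hb⟩
              exact hnew ha hb)]
            exact (hinv m hm).mpr ⟨h2m, hall⟩
        · rw [if_neg hsv]
          refine ⟨hlen, ?_⟩
          intro m hm
          rw [hrhs m]
          have hjNN : jN ≤ N := le_trans hjNs (Nat.sqrt_le_self N)
          have hnt : ¬ (2 ≤ jN ∧ ∀ d : Nat, 2 ≤ d → (d : Int) < j → d * d ≤ jN → ¬ d ∣ jN) := by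
            intro hcl
            exact hsv ((hinv jN hjNN).mpr hcl)
          have hex : ∃ d : Nat, 2 ≤ d ∧ (d : Int) < j ∧ d * d ≤ jN ∧ d ∣ jN := by
            by_contra hno
            push_neg at hno
            exact hnt ⟨hjN2, fun d h1 h2 h3 => hno d h1 h2 h3⟩
          obtain ⟨d0, hd01, hd02, hd03, hd04⟩ := hex
          rw [hinv m hm]
          constructor
          · rintro ⟨h2m, hall⟩
            refine ⟨h2m, hall, ?_⟩
            intro hle hdvd
            have : d0 ∣ m := hd04.trans hdvd
            exact hall d0 hd01 hd02 (by nlinarith) this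
          · rintro ⟨h2m, hall, -⟩
            exact ⟨h2m, hall⟩
    obtain ⟨hlenf, hf⟩ := hfin
    constructor
    · intro hx
      rw [List.mem_filter] at hx
      obtain ⟨hxr, hxp⟩ := hx
      rw [PySem.List.mem_pyRange_one] at hxr
      refine ⟨x.toNat, by omega, ?_, by omega⟩
      have hxN : x.toNat ≤ N := by omega
      have := (hf x.toNat hxN).mp (by simpa using hxp)
      obtain ⟨h2m, hall⟩ := this
      by_contra hnp
      have hmf := Nat.minFac_dvd x.toNat
      have hmfp : (x.toNat).minFac.Prime := Nat.minFac_prime (by omega)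
      have hsq : (x.toNat).minFac * (x.toNat).minFac ≤ x.toNat := by
        have := Nat.minFac_sq_le_self (by omega : 0 < x.toNat) hnp
        nlinarith [this]
      have hles : ((x.toNat).minFac : Int) < (s : Int) + 1 := by
        have : (x.toNat).minFac ≤ s := by
          rw [hs, Nat.le_sqrt]
          calc (x.toNat).minFac * (x.toNat).minFac ≤ x.toNat := hsq
          _ ≤ N := hxN
        omega
      exact hall (x.toNat).minFac hmfp.two_le hles hsq hmf
    · rintro ⟨m, rfl, hp, hle⟩
      rw [List.mem_filter]
      have h2m := hp.two_le
      constructor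
      · rw [PySem.List.mem_pyRange_one]
        constructor <;> [omega; omega]
      · simp only [Int.toNat_natCast, decide_eq_true_eq]
        rw [hf m hle]
        refine ⟨h2m, ?_⟩
        intro d hd1 hd2 hd3 hdvd
        rcases (Nat.Prime.eq_one_or_self_of_dvd hp d hdvd) with h | h
        · omega
        · subst h
          nlinarith

theorem trialLoop_spec (a0 arr : List Int) (N : Nat)
    (hAg : ∀ m : Nat, IsPP m → m ≤ N → arr.getD m 0 = a0.getD m 0) :
    ∀ (ps : List Int) (t : Nat) (val : Int) (fuel : Nat),
      ps.Pairwise (· < ·) →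
      (∀ x ∈ ps, ∃ q : Nat, x = (q : Int) ∧ q.Prime) →
      (∀ q : Nat, q.Prime → q ∣ t → (q : Int) ∈ ps) →
      1 ≤ t → t ≤ N → t ≤ fuel →
      (fun r : Int × Int => if r.1 > 1 then r.2 * arr.getD r.1.toNat 0 else r.2)
          (trialLoop arr ps (t : Int) val fuel) = val * Fc a0 t := by
  intro ps
  induction ps with
  | nil =>
    intro t val fuel _ _ hfac h1 hN hf
    have ht1 : t = 1 := by
      by_contra hne
      have hp := Nat.minFac_prime hne
      exact absurd (hfac t.minFac hp (Nat.minFac_dvd t)) (List.not_mem_nil)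
    subst ht1
    simp [trialLoop, Fc_lt_two a0 1 (by omega)]
  | cons p ps ih =>
    intro t val fuel hsort hprime hfac h1 hN hf
    obtain ⟨q, rfl, hq⟩ := hprime p (by simp)
    have hq2 := hq.two_le
    rw [trialLoop]
    by_cases ht1 : t = 1
    · subst ht1
      rw [if_pos (by push_cast; nlinarith)]
      simp [Fc_lt_two a0 1 (by omega)]
    · have ht2 : 2 ≤ t := by omega
      have hminge : q ≤ t.minFac := by
        have hmem := hfac t.minFac (Nat.minFac_prime ht1) (Nat.minFac_dvd t)
        rcases List.mem_cons.mp hmem with h | h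
        · omega
        · have := (List.pairwise_cons.mp hsort).1 _ h
          omega
      by_cases hbreak : (q : Int) * q > t
      · rw [if_pos hbreak]
        have htp : t.Prime := by
          by_contra hnp
          have := Nat.minFac_sq_le_self (by omega : 0 < t) hnp
          have h2 : q * q ≤ t.minFac * t.minFac := Nat.mul_le_mul hminge hminge
          have h3 : (q * q : Nat) ≤ t := by nlinarith
          have : ((q * q : Nat) : Int) ≤ (t : Int) := by exact_mod_cast h3
          push_cast at this
          omega
        have hFc : Fc a0 t = a0.getD t 0 := Fc_pp a0 t ⟨t, 1, htp, le_rfl, by simp⟩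
        simp only
        rw [if_pos (by exact_mod_cast (by omega : (1:Int) < (t:Int)))]
        rw [Int.toNat_natCast, hAg t ⟨t, 1, htp, le_rfl, by simp⟩ hN, hFc]
      · rw [if_neg hbreak]
        by_cases hdvd : q ∣ t
        · rw [if_pos (by rw [PySem.Int.mod_eq_zero_iff_dvd]; exact_mod_cast hdvd)]
          simp only
          rw [stripLoop_eq q hq2 fuel t 1 h1 hf, one_mul]
          have hqmin : t.minFac = q := le_antisymm (Nat.minFac_le_of_dvd hq2 hdvd) hminge
          set pk := (pstrip q t).1 with hpk
          set t2 := (pstrip q t).2 with ht2'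
          have hppk : IsPP pk := IsPP_pstrip_fst q t hq hdvd (by omega)
          have hpkle : pk ≤ N := by
            have hm := pstrip_mul q t
            have := pstrip_snd_pos q t (by omega)
            have : pk ≤ t := Nat.le_of_dvd (by omega) ⟨t2, hm.symm⟩
            omega
          have ht21 : 1 ≤ t2 := Nat.pos_of_ne_zero (pstrip_snd_pos q t (by omega))
          have ht2le : t2 ≤ t := by
            have hm := pstrip_mul q t
            have hpk2 := IsPP_two_le pk hppk
            nlinarith
          have ht2dvd : t2 ∣ t := ⟨pk, by rw [mul_comm]; exact (pstrip_mul q t).symm⟩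
          have ihres := ih t2 (val * arr.getD pk 0) fuel
            (List.pairwise_cons.mp hsort).2
            (fun x hx => hprime x (by simp [hx]))
            (fun r hr hrd => by
              have hmem := hfac r hr (hrd.trans ht2dvd)
              rcases List.mem_cons.mp hmem with h | h
              · exfalso
                have hreq : r = q := by exact_mod_cast h
                exact pstrip_not_dvd q t hq2 (by omega) (by rwa [hreq] at hrd)
              · exact h)
            ht21 (by omega) (by omega)
          simp only [Int.toNat_natCast] at ihres ⊢
          rw [ihres, Fc_step a0 t ht2, hqmin, ← hpk, ← ht2', hAg pk hppk hpkle]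
          ring
        · rw [if_neg (by rw [PySem.Int.mod_eq_zero_iff_dvd]; exact_mod_cast hdvd)]
          exact ih t val fuel (List.pairwise_cons.mp hsort).2
            (fun x hx => hprime x (by simp [hx]))
            (fun r hr hrd => by
              have hmem := hfac r hr hrd
              rcases List.mem_cons.mp hmem with h | h
              · exfalso
                have : r = q := by exact_mod_cast h
                subst this
                exact hdvd hrd
              · exact h)
            h1 hN hf

theorem getD_set_ne (l : List Int) (i : Nat) (v : Int) (m : Nat) (h : i ≠ m) :
    (l.set i v).getD m 0 = l.getD m 0 := by
  simp [List.getD_eq_getElem?_getD, List.getElem?_set, h]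

theorem getD_set_self (l : List Int) (i : Nat) (v : Int) (h : i < l.length) :
    (l.set i v).getD i 0 = v := by
  simp [List.getD_eq_getElem?_getD, List.getElem?_set, h]

theorem ppWhile_length (nt p ap : Int) :
    ∀ (fuel : Nat) (pk : Int) (a : List Int), (ppWhile nt p ap pk a fuel).length = a.length := by
  intro fuel
  induction fuel with
  | zero => intro pk a; rfl
  | succ fuel ih =>
    intro pk a
    rw [ppWhile]
    split_ifs with h
    · rw [ih]; simp
    · rfl

theorem ppWhile_getD_notPP (nt ap : Int) (q : Nat) (hq : q.Prime) (m : Nat) (hm : ¬ IsPP m) :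
    ∀ (fuel : Nat) (pk : Int) (a : List Int), (∃ k, 1 ≤ k ∧ pk = ((q ^ k : Nat) : Int)) →
      (ppWhile nt (q : Int) ap pk a fuel).getD m 0 = a.getD m 0 := by
  intro fuel
  induction fuel with
  | zero => intro pk a _; rfl
  | succ fuel ih =>
    rintro pk a ⟨k, hk1, rfl⟩
    rw [ppWhile]
    split_ifs with h
    · rw [ih _ _ ⟨k + 1, by omega, by push_cast [pow_succ]; ring⟩]
      refine getD_set_ne _ _ _ _ ?_
      rw [Int.toNat_natCast]
      intro he
      exact hm ⟨q, k, hq, hk1, he.symm⟩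
    · rfl

theorem baseFill_length (a_coeff b_coeff nt : Int) (P : List Int) :
    ((baseFill a_coeff b_coeff nt P).2).length = nt.toNat + 1 := by
  rw [baseFill]
  simp only
  refine List.foldlRecOn (motive := fun (l : List Int) => l.length = nt.toNat + 1) P _ ?_ ?_
  · have : ∀ (st : PySem.Dict Int Int × List Int), st.2.length = nt.toNat + 1 →
        (P.foldl (fun st p => (st.1.insert p (ellipticCurveAp a_coeff b_coeff p),
          st.2.set p.toNat (ellipticCurveAp a_coeff b_coeff p))) st).2.length = nt.toNat + 1 := by
      intro st h
      refine List.foldlRecOn (motive := fun (s : PySem.Dict Int Int × List Int) => s.2.length = nt.toNat + 1) P _ h ?_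
      intro b hb ap hap
      simpa using hb
    exact this (PySem.Dict.empty, (List.replicate (nt.toNat + 1) (0:Int)).set 1 1) (by simp)
  · intro b hb p hp
    rw [ppWhile_length]
    exact hb

theorem baseFill_support (a_coeff b_coeff nt : Int) (P : List Int)
    (hP : ∀ x ∈ P, ∃ q : Nat, x = (q : Int) ∧ q.Prime)
    (m : Nat) (hm2 : 2 ≤ m) (hm : ¬ IsPP m) :
    ((baseFill a_coeff b_coeff nt P).2).getD m 0 = 0 := by
  rw [baseFill]
  simp only
  have h0 : (((List.replicate (nt.toNat + 1) (0:Int)).set 1 1)).getD m 0 = 0 := by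
    rw [getD_set_ne _ _ _ _ (by omega)]
    simp only [List.getD_eq_getElem?_getD, List.getElem?_replicate]
    split <;> rfl
  have h1 : ∀ (st : PySem.Dict Int Int × List Int), st.2.getD m 0 = 0 →
      (P.foldl (fun st p => (st.1.insert p (ellipticCurveAp a_coeff b_coeff p),
        st.2.set p.toNat (ellipticCurveAp a_coeff b_coeff p))) st).2.getD m 0 = 0 := by
    intro st h
    refine List.foldlRecOn (motive := fun (s : PySem.Dict Int Int × List Int) => s.2.getD m 0 = 0) P _ h ?_
    intro b hb p hp
    obtain ⟨q, rfl, hq⟩ := hP p hp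
    simp only
    rw [getD_set_ne _ _ _ _ ?ne]
    · exact hb
    case ne =>
      rw [Int.toNat_natCast]
      intro he
      exact hm ⟨q, 1, hq, le_rfl, by simpa using he.symm⟩
  refine List.foldlRecOn (motive := fun (l : List Int) => l.getD m 0 = 0) P _ (h1 (PySem.Dict.empty, (List.replicate (nt.toNat + 1) (0:Int)).set 1 1) h0) ?_
  intro b hb p hp
  obtain ⟨q, rfl, hq⟩ := hP p hp
  rw [ppWhile_getD_notPP nt _ q hq m hm _ _ _ ⟨2, by omega, by push_cast; ring⟩]
  exact hb

theorem primesUpTo_sorted (n : Int) : (primesUpTo n).Pairwise (· < ·) := by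
  rw [primesUpTo]
  split_ifs
  · exact List.Pairwise.nil
  · exact List.Pairwise.filter _ (PySem.List.pairwise_lt_pyRange_one _ _)

-- A's result, characterised: entry m ≥ 2 is the multiplicative completion Fc of
-- the base array
theorem apass (a_coeff b_coeff : Int) (N : Nat) (hN : 1 ≤ N) :
    (l_series_coefficients a_coeff b_coeff (N : Int)).length = N + 1 ∧
    ∀ m : Nat, m ≤ N → (l_series_coefficients a_coeff b_coeff (N : Int)).getD m 0 =
      (if 2 ≤ m then Fc ((baseFill a_coeff b_coeff (N : Int) (primesUpTo (N : Int))).2) m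
       else ((baseFill a_coeff b_coeff (N : Int) (primesUpTo (N : Int))).2).getD m 0) := by
  set P := primesUpTo (N : Int) with hP
  set a0 := (baseFill a_coeff b_coeff (N : Int) P).2 with ha0
  have hlen0 : a0.length = N + 1 := by
    rw [ha0, baseFill_length, Int.toNat_natCast]
  have hPel : ∀ x ∈ P, ∃ q : Nat, x = (q : Int) ∧ q.Prime := by
    intro x hx
    obtain ⟨q, rfl, hq, -⟩ := (primesUpTo_mem N x).mp hx
    exact ⟨q, rfl, hq⟩
  have hsupp : ∀ m : Nat, 2 ≤ m → ¬ IsPP m → a0.getD m 0 = 0 :=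
    fun m h1 h2 => baseFill_support a_coeff b_coeff _ P hPel m h1 h2
  have hPsort : P.Pairwise (· < ·) := primesUpTo_sorted _
  have hfold : l_series_coefficients a_coeff b_coeff (N : Int) =
      (PySem.List.pyRange 2 ((N : Int) + 1) 1).foldl (fun a n =>
        if a.getD n.toNat 0 ≠ 0 then a
        else a.set n.toNat (if (trialLoop a P n 1 N).1 > 1
          then (trialLoop a P n 1 N).2 * a.getD (trialLoop a P n 1 N).1.toNat 0
          else (trialLoop a P n 1 N).2)) a0 := by
    rw [l_series_coefficients]
    simp only [Int.toNat_natCast, ← hP, ← ha0]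
  rw [hfold]
  have hInv := pyRange_foldl_ind (fun a n =>
        if a.getD n.toNat 0 ≠ 0 then a
        else a.set n.toNat (if (trialLoop a P n 1 N).1 > 1
          then (trialLoop a P n 1 N).2 * a.getD (trialLoop a P n 1 N).1.toNat 0
          else (trialLoop a P n 1 N).2)) 2
      (fun j arr => arr.length = N + 1 ∧ ∀ m : Nat, m ≤ N →
        arr.getD m 0 = if 2 ≤ m ∧ (m : Int) < j then Fc a0 m else a0.getD m 0)
      ((N : Int) + 1) a0 (by omega) ⟨hlen0, ?base⟩ ?step
  case base =>
    intro m hm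
    rw [if_neg (by omega)]
  case step =>
    intro j arr hj1 hj2 hIv
    obtain ⟨hlen, hinv⟩ := hIv
    set nN := j.toNat with hnNdef
    have hjcast : (nN : Int) = j := by omega
    have hnN2 : 2 ≤ nN := by omega
    have hnNle : nN ≤ N := by omega
    have hAg : ∀ m : Nat, IsPP m → m ≤ N → arr.getD m 0 = a0.getD m 0 := by
      intro m hpp hmle
      rw [hinv m hmle]
      split_ifs with hc
      · exact Fc_pp a0 m hpp
      · rfl
    simp only
    by_cases hskip : arr.getD j.toNat 0 ≠ 0
    · rw [if_pos hskip]
      refine ⟨hlen, ?_⟩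
      intro m hm
      rw [hinv m hm]
      by_cases hcj : 2 ≤ m ∧ (m : Int) < j
      · rw [if_pos hcj, if_pos ⟨hcj.1, by omega⟩]
      · by_cases hcj1 : 2 ≤ m ∧ (m : Int) < j + 1
        · have hmn : m = nN := by omega
          rw [if_neg hcj, if_pos hcj1]
          rw [← hjcast, Int.toNat_natCast, hinv nN hnNle, if_neg (by omega)] at hskip
          have hpp : IsPP m := by
            rw [hmn]
            by_contra hnp
            exact hskip (hsupp nN (by omega) hnp)
          rw [hmn]
          exact (Fc_pp a0 nN (hmn ▸ hpp)).symm
        · rw [if_neg hcj, if_neg hcj1]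
    · rw [if_neg hskip]
      have hfac : ∀ q : Nat, q.Prime → q ∣ nN → (q : Int) ∈ P := by
        intro q hq hd
        exact (primesUpTo_mem N _).mpr ⟨q, rfl, hq,
          le_trans (Nat.le_of_dvd (by omega) hd) hnNle⟩
      have hspec := trialLoop_spec a0 arr N hAg P nN 1 N hPsort hPel hfac (by omega) hnNle hnNle
      simp only at hspec
      rw [one_mul] at hspec
      rw [← hjcast, Int.toNat_natCast, hspec]
      refine ⟨by simpa using hlen, ?_⟩
      intro m hm
      by_cases hmn : m = nN
      · subst hmn
        rw [getD_set_self _ _ _ (by omega)]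
        rw [if_pos ⟨hnN2, by omega⟩]
      · rw [getD_set_ne _ _ _ _ (fun h => hmn h.symm)]
        rw [hinv m hm]
        by_cases hcj : 2 ≤ m ∧ (m : Int) < j
        · rw [if_pos hcj, if_pos ⟨hcj.1, by omega⟩]
        · rw [if_neg hcj, if_neg (by
            rintro ⟨h1, h2⟩
            have : (m : Int) < j := by
              rcases lt_or_eq_of_le (by omega : (m:Int) ≤ j) with h | h
              · exact h
              · exact absurd (by omega : m = nN) hmn
            exact hcj ⟨h1, this⟩)]
  obtain ⟨hlenf, hvf⟩ := hInv
  refine ⟨hlenf, ?_⟩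
  intro m hm
  rw [hvf m hm]
  by_cases h2m : 2 ≤ m
  · rw [if_pos ⟨h2m, by omega⟩, if_pos h2m]
  · rw [if_neg (by omega), if_neg h2m]

-- ===== B-side lemmas =====
-- the Hecke prime-power sequence a_{p^k}
def Erec (q ap : Int) : Nat → Int
  | 0 => 1
  | 1 => ap
  | k + 2 => ap * Erec q ap (k + 1) - q * Erec q ap k

theorem Erec_zero (q ap : Int) : Erec q ap 0 = 1 := rfl
theorem Erec_one (q ap : Int) : Erec q ap 1 = ap := rfl

theorem Erec_two_sub (q ap : Int) (k : Nat) (hk : 2 ≤ k) :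
    Erec q ap k = ap * Erec q ap (k - 1) - q * Erec q ap (k - 2) := by
  obtain ⟨m, rfl⟩ : ∃ m, k = m + 2 := ⟨k - 2, by omega⟩
  rfl

theorem prime_ne_pow (q q' k : Nat) (hq2 : 2 ≤ q) (hq' : q'.Prime) (hk : 2 ≤ k) :
    q' ≠ q ^ k := by
  intro h
  have hdvd : q ∣ q' := h ▸ dvd_pow_self q (by omega)
  rcases hq'.eq_one_or_self_of_dvd q hdvd with h1 | h1
  · omega
  · subst h1
    have : q ^ 1 < q ^ k := Nat.pow_lt_pow_right (by omega) (by omega)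
    rw [pow_one] at this
    omega

theorem prime_pow_ne (q q' k k' : Nat) (hq : q.Prime) (hq' : q'.Prime) (hk : 1 ≤ k)
    (hne : q ≠ q') : q ^ k ≠ q' ^ k' := by
  intro h
  have hdvd : q ∣ q' ^ k' := h ▸ dvd_pow_self q (by omega)
  have h2 := hq.dvd_of_dvd_pow hdvd
  rcases hq'.eq_one_or_self_of_dvd q h2 with h1 | h1
  · have := hq.two_le; omega
  · exact hne h1

-- full characterisation of A's prime-power while loop
theorem ppWhile_vals (N q : Nat) (hq : 2 ≤ q) (ap : Int) :
    ∀ (fuel k0 : Nat) (a : List Int), 2 ≤ k0 → a.length = N + 1 → N + 1 ≤ fuel + k0 →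
      (∀ i : Nat, i < k0 → q ^ i ≤ N → a.getD (q ^ i) 0 = Erec (q:Int) ap i) →
      (ppWhile (N:Int) (q:Int) ap ((q ^ k0 : Nat) : Int) a fuel).length = N + 1 ∧
      (∀ m : Nat, (∀ j : Nat, k0 ≤ j → m ≠ q ^ j) →
        (ppWhile (N:Int) (q:Int) ap ((q ^ k0 : Nat) : Int) a fuel).getD m 0 = a.getD m 0) ∧
      (∀ i : Nat, q ^ i ≤ N →
        (ppWhile (N:Int) (q:Int) ap ((q ^ k0 : Nat) : Int) a fuel).getD (q ^ i) 0 = Erec (q:Int) ap i) := by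
  intro fuel
  induction fuel with
  | zero =>
    intro k0 a hk0 hlen hfuel hvals
    refine ⟨hlen, fun m _ => rfl, ?_⟩
    intro i hi
    have h2 : i < k0 := by
      by_contra h
      push_neg at h
      have h1 : k0 < 2 ^ k0 := Nat.lt_two_pow_self
      have h3 : 2 ^ k0 ≤ q ^ k0 := Nat.pow_le_pow_left hq k0
      have h4 : q ^ k0 ≤ q ^ i := Nat.pow_le_pow_right (by omega) h
      omega
    exact hvals i h2 hi
  | succ fuel ih =>
    intro k0 a hk0 hlen hfuel hvals
    rw [ppWhile]
    by_cases hle : ((q ^ k0 : Nat) : Int) ≤ (N : Int)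
    · rw [if_pos hle]
      have hleN : q ^ k0 ≤ N := by exact_mod_cast hle
      have e1 : q ^ k0 / q = q ^ (k0 - 1) := by
        rw [(by rw [← pow_succ]; congr 1; omega : q ^ k0 = q ^ (k0 - 1) * q)]
        exact Nat.mul_div_cancel _ (by omega)
      have e2 : q ^ (k0 - 1) / q = q ^ (k0 - 2) := by
        rw [(by rw [← pow_succ]; congr 1; omega : q ^ (k0 - 1) = q ^ (k0 - 2) * q)]
        exact Nat.mul_div_cancel _ (by omega)
      have hle1 : q ^ (k0 - 1) ≤ N := le_trans (Nat.pow_le_pow_right (by omega) (by omega)) hleN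
      have hle2 : q ^ (k0 - 2) ≤ N := le_trans (Nat.pow_le_pow_right (by omega) (by omega)) hleN
      simp only [PySem.Int.floordiv_natCast, e1, e2, Int.toNat_natCast]
      rw [hvals (k0 - 1) (by omega) hle1, hvals (k0 - 2) (by omega) hle2]
      have hval : ap * Erec (q:Int) ap (k0 - 1) - (q:Int) * Erec (q:Int) ap (k0 - 2)
          = Erec (q:Int) ap k0 := (Erec_two_sub (q:Int) ap k0 hk0).symm
      rw [hval]
      have hcast : ((q ^ k0 : Nat) : Int) * (q : Int) = ((q ^ (k0 + 1) : Nat) : Int) := by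
        push_cast [pow_succ]; ring
      rw [hcast]
      have hset : ∀ i : Nat, i < k0 + 1 → q ^ i ≤ N →
          (a.set (q ^ k0) (Erec (q:Int) ap k0)).getD (q ^ i) 0 = Erec (q:Int) ap i := by
        intro i hi hqi
        by_cases hik : i = k0
        · subst hik
          exact getD_set_self _ _ _ (by omega)
        · have hne2 : q ^ k0 ≠ q ^ i := fun h => hik (Nat.pow_right_injective hq h).symm
          rw [getD_set_ne a (q ^ k0) (Erec (q:Int) ap k0) (q ^ i) hne2]
          exact hvals i (by omega) hqi
      obtain ⟨L, U, V⟩ := ih (k0 + 1) (a.set (q ^ k0) (Erec (q:Int) ap k0)) (by omega)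
        (by rw [List.length_set]; exact hlen) (by omega) hset
      refine ⟨L, ?_, V⟩
      intro m hm
      rw [U m (fun j hj => hm j (by omega)),
        getD_set_ne _ _ _ _ (fun h => hm k0 le_rfl h.symm)]
    · rw [if_neg hle]
      refine ⟨hlen, fun m _ => rfl, ?_⟩
      intro i hi
      have hgt : N < q ^ k0 := by
        by_contra h
        push_neg at h
        exact hle (by exact_mod_cast h)
      have h2 : i < k0 := by
        by_contra h
        push_neg at h
        have := Nat.pow_le_pow_right (show 1 ≤ q by omega) h
        omega
      exact hvals i h2 hi

-- A's a_p pass, factored out for the fold lemma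
def primeStep (a_coeff b_coeff : Int) : (PySem.Dict Int Int × List Int) → Int → (PySem.Dict Int Int × List Int) :=
  fun st p =>
    let ap := ellipticCurveAp a_coeff b_coeff p
    (st.1.insert p ap, st.2.set p.toNat ap)

theorem primePass_spec (a_coeff b_coeff : Int) :
    ∀ (ps : List Int) (st : PySem.Dict Int Int × List Int),
      (∀ x ∈ ps, ∃ q : Nat, x = (q : Int) ∧ 2 ≤ q ∧ q < st.2.length) →
      ps.Pairwise (· < ·) →
      (ps.foldl (primeStep a_coeff b_coeff) st).2.length = st.2.length ∧
      (∀ m : Nat, (m : Int) ∉ ps → (ps.foldl (primeStep a_coeff b_coeff) st).2.getD m 0 = st.2.getD m 0) ∧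
      (∀ k : Int, k ∉ ps → (ps.foldl (primeStep a_coeff b_coeff) st).1.getD k 0 = st.1.getD k 0) ∧
      (∀ x ∈ ps, (ps.foldl (primeStep a_coeff b_coeff) st).2.getD x.toNat 0 = ellipticCurveAp a_coeff b_coeff x) ∧
      (∀ x ∈ ps, (ps.foldl (primeStep a_coeff b_coeff) st).1.getD x 0 = ellipticCurveAp a_coeff b_coeff x) := by
  intro ps
  induction ps with
  | nil =>
    intro st _ _
    exact ⟨rfl, fun m _ => rfl, fun k _ => rfl, by simp, by simp⟩
  | cons x tail ih =>
    intro st hel hsort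
    obtain ⟨q, hx, hq2, hqlen⟩ := hel x (by simp)
    rw [List.foldl_cons]
    have hst'2 : (primeStep a_coeff b_coeff st x).2 = st.2.set x.toNat (ellipticCurveAp a_coeff b_coeff x) := rfl
    have hst'1 : (primeStep a_coeff b_coeff st x).1 = st.1.insert x (ellipticCurveAp a_coeff b_coeff x) := rfl
    have hlen' : (primeStep a_coeff b_coeff st x).2.length = st.2.length := by
      rw [hst'2]; simp
    obtain ⟨L, U2, U1, M2, M1⟩ := ih (primeStep a_coeff b_coeff st x)
      (by
        intro y hy
        obtain ⟨r, hr1, hr2, hr3⟩ := hel y (by simp [hy])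
        exact ⟨r, hr1, hr2, by rw [hlen']; exact hr3⟩)
      (List.pairwise_cons.mp hsort).2
    have hxtail : x ∉ tail := by
      intro h
      have := (List.pairwise_cons.mp hsort).1 x h
      omega
    refine ⟨by rw [L, hlen'], ?_, ?_, ?_, ?_⟩
    · intro m hm
      rw [U2 m (fun h => hm (by simp [h])), hst'2,
        getD_set_ne _ _ _ _ (by
          intro h
          apply hm
          simp only [List.mem_cons]
          left
          rw [hx] at h ⊢
          simp only [Int.toNat_natCast] at h
          exact_mod_cast h.symm)]
    · intro k hk
      rw [U1 k (fun h => hk (by simp [h])), hst'1, PySem.Dict.getD_insert,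
        if_neg (fun h => hk (by simp [h]))]
    · intro y hy
      rcases List.mem_cons.mp hy with rfl | hyt
      · have hxt2 : ((y.toNat : Nat) : Int) ∉ tail := by
          rw [hx]; simpa [hx] using hxtail
        rw [U2 y.toNat hxt2, hst'2]
        refine getD_set_self _ _ _ ?_
        rw [hx]; simpa [hx] using hqlen
      · exact M2 y hyt
    · intro y hy
      rcases List.mem_cons.mp hy with rfl | hyt
      · rw [U1 y hxtail, hst'1, PySem.Dict.getD_insert, if_pos rfl]
      · exact M1 y hyt

-- A's prime-power fold across all primes
theorem ppFold_spec (N : Nat) (d : PySem.Dict Int Int) (apf : Nat → Int) :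
    ∀ (ps : List Int) (arr : List Int),
      (∀ x ∈ ps, ∃ q : Nat, x = (q : Int) ∧ q.Prime ∧ q ≤ N ∧ d.getD x 0 = apf q) →
      ps.Pairwise (· < ·) →
      arr.length = N + 1 →
      arr.getD 1 0 = 1 →
      (∀ x ∈ ps, ∀ q : Nat, x = (q : Int) → arr.getD q 0 = apf q) →
      (ps.foldl (fun a p => ppWhile (N:Int) p (d.getD p 0) (p * p) a (N + 1)) arr).length = N + 1 ∧
      (∀ m : Nat, (∀ x ∈ ps, ∀ q k : Nat, x = (q : Int) → 2 ≤ k → m ≠ q ^ k) →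
        (ps.foldl (fun a p => ppWhile (N:Int) p (d.getD p 0) (p * p) a (N + 1)) arr).getD m 0 = arr.getD m 0) ∧
      (∀ x ∈ ps, ∀ q : Nat, x = (q : Int) → ∀ k : Nat, 1 ≤ k → q ^ k ≤ N →
        (ps.foldl (fun a p => ppWhile (N:Int) p (d.getD p 0) (p * p) a (N + 1)) arr).getD (q ^ k) 0 = Erec (q:Int) (apf q) k) := by
  intro ps
  induction ps with
  | nil =>
    intro arr _ _ hlen _ _
    exact ⟨hlen, fun m _ => rfl, by simp⟩
  | cons x tail ih =>
    intro arr hel hsort hlen h1 hmem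
    obtain ⟨q, hx, hqp, hqN, hd⟩ := hel x (by simp)
    subst hx
    rw [List.foldl_cons]
    have hq2 := hqp.two_le
    have hcast : (q : Int) * (q : Int) = ((q ^ 2 : Nat) : Int) := by push_cast; ring
    rw [hcast, hd]
    have hv : ∀ i : Nat, i < 2 → q ^ i ≤ N → arr.getD (q ^ i) 0 = Erec (q:Int) (apf q) i := by
      intro i hi hqi
      interval_cases i
      · rw [pow_zero, Erec_zero]; exact h1
      · rw [pow_one, Erec_one]
        exact hmem (q : Int) (by simp) q rfl
    obtain ⟨L1, U1, V1⟩ := ppWhile_vals N q hq2 (apf q) (N + 1) 2 arr le_rfl hlen (by omega) hv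
    have hU1' : ∀ m : Nat, (∀ j : Nat, 2 ≤ j → m ≠ q ^ j) →
        (ppWhile (N:Int) (q:Int) (apf q) ((q ^ 2 : Nat) : Int) arr (N + 1)).getD m 0 = arr.getD m 0 := U1
    obtain ⟨L2, U2, V2⟩ := ih (ppWhile (N:Int) (q:Int) (apf q) ((q ^ 2 : Nat) : Int) arr (N + 1))
      (fun y hy => hel y (by simp [hy]))
      (List.pairwise_cons.mp hsort).2
      L1
      (by
        rw [hU1' 1 (fun j hj h => by
          have h4 : (4:Nat) ≤ q ^ j := by
            calc (4:Nat) = 2 ^ 2 := by norm_num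
            _ ≤ q ^ 2 := Nat.pow_le_pow_left hq2 2
            _ ≤ q ^ j := Nat.pow_le_pow_right (by omega) hj
          omega)]
        exact h1)
      (by
        intro y hy q' hy'
        obtain ⟨q'', hy'', hq''p, -, -⟩ := hel y (by simp [hy])
        have hqq : q' = q'' := by rw [hy'] at hy''; exact_mod_cast hy''
        subst hqq
        rw [hU1' q' (fun j hj h => prime_ne_pow q q' j hq2 hq''p hj h)]
        exact hmem y (by simp [hy]) q' hy')
    refine ⟨L2, ?_, ?_⟩
    · intro m hm
      rw [U2 m (fun y hy q' k hy' hk h => hm y (by simp [hy]) q' k hy' hk h),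
        hU1' m (fun j hj h => hm (q : Int) (by simp) q j rfl hj h)]
    · intro y hy q' hy' k hk hkN
      rcases List.mem_cons.mp hy with heq | hyt
      · have hqq : q' = q := by rw [heq] at hy'; exact_mod_cast hy'.symm
        subst hqq
        rw [U2 (q' ^ k) (by
          intro z hz q'' k'' hz'' hk'' h
          obtain ⟨q3, hz3, hq3p, -, -⟩ := hel z (by simp [hz])
          have : q'' = q3 := by rw [hz''] at hz3; exact_mod_cast hz3
          subst this
          have hlt := (List.pairwise_cons.mp hsort).1 z hz
          rw [hz''] at hlt
          have hne : q' ≠ q'' := by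
            intro hcontra
            subst hcontra
            simp at hlt
          exact prime_pow_ne q' q'' k k'' hqp hq3p hk hne h)]
        exact V1 k hkN
      · exact V2 y hyt q' hy' k hk hkN

-- values of A's base array at 0, 1 and the prime powers
theorem baseFill_props (a_coeff b_coeff : Int) (N : Nat) (hN : 1 ≤ N) :
    ((baseFill a_coeff b_coeff (N:Int) (primesUpTo (N:Int))).2).getD 0 0 = 0 ∧
    ((baseFill a_coeff b_coeff (N:Int) (primesUpTo (N:Int))).2).getD 1 0 = 1 ∧
    (∀ q k : Nat, q.Prime → 1 ≤ k → q ^ k ≤ N →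
      ((baseFill a_coeff b_coeff (N:Int) (primesUpTo (N:Int))).2).getD (q ^ k) 0
        = Erec (q:Int) (ellipticCurveAp a_coeff b_coeff (q:Int)) k) := by
  set P := primesUpTo (N:Int) with hP
  have hPel : ∀ x ∈ P, ∃ q : Nat, x = (q : Int) ∧ q.Prime ∧ q ≤ N := by
    intro x hx
    obtain ⟨q, rfl, hq, hle⟩ := (primesUpTo_mem N x).mp hx
    exact ⟨q, rfl, hq, hle⟩
  have hPsort : P.Pairwise (· < ·) := primesUpTo_sorted _
  rw [baseFill]
  simp only [Int.toNat_natCast]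
  set init := (List.replicate (N + 1) (0:Int)).set 1 1 with hinit
  have hinitlen : init.length = N + 1 := by rw [hinit]; simp
  have hinit1 : init.getD 1 0 = 1 := getD_set_self _ _ _ (by simp only [List.length_replicate]; omega)
  have hinit0 : init.getD 0 0 = 0 := by
    rw [hinit, getD_set_ne _ _ _ _ (by omega)]
    simp [List.getD_eq_getElem?_getD, List.getElem?_replicate]
  have hstepeq : (fun (st : PySem.Dict Int Int × List Int) p =>
      let ap := ellipticCurveAp a_coeff b_coeff p
      (st.1.insert p ap, st.2.set p.toNat ap)) = primeStep a_coeff b_coeff := rfl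
  rw [hstepeq]
  obtain ⟨L, U2, U1, M2, M1⟩ := primePass_spec a_coeff b_coeff P (PySem.Dict.empty, init)
    (by
      intro x hx
      obtain ⟨q, rfl, hq, hle⟩ := hPel x hx
      exact ⟨q, rfl, hq.two_le, by simp only; rw [hinitlen]; omega⟩)
    hPsort
  set st := P.foldl (primeStep a_coeff b_coeff) (PySem.Dict.empty, init) with hst
  have hone : (1 : Int) ∉ P := by
    intro h
    obtain ⟨q, hq1, hq, -⟩ := hPel 1 h
    have := hq.two_le
    omega
  have hzero : (0 : Int) ∉ P := by
    intro h
    obtain ⟨q, hq1, hq, -⟩ := hPel 0 h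
    have := hq.two_le
    omega
  have harr1 : st.2.getD 1 0 = 1 := by
    have := U2 1 (by simpa using hone)
    simp only at this
    rw [this]; exact hinit1
  have harr0 : st.2.getD 0 0 = 0 := by
    have := U2 0 (by simpa using hzero)
    simp only at this
    rw [this]; exact hinit0
  obtain ⟨L', U', V'⟩ := ppFold_spec N st.1 (fun q => ellipticCurveAp a_coeff b_coeff (q:Int)) P st.2
    (by
      intro x hx
      obtain ⟨q, rfl, hq, hle⟩ := hPel x hx
      exact ⟨q, rfl, hq, hle, M1 _ hx⟩)
    hPsort
    (by rw [L]; simp only; rw [hinitlen])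
    harr1
    (by
      intro x hx q hxq
      have h := M2 x hx
      rw [hxq] at h
      simpa using h)
  refine ⟨?_, ?_, ?_⟩
  · rw [U' 0 (by
      intro x hx q k hxq hk h
      obtain ⟨q', hxq', hq', -⟩ := hPel x hx
      have hqq : q = q' := by rw [hxq] at hxq'; exact_mod_cast hxq'
      subst hqq
      have h4 : (4:Nat) ≤ q ^ k :=
        calc (4:Nat) = 2 ^ 2 := by norm_num
        _ ≤ q ^ k := le_trans (Nat.pow_le_pow_left hq'.two_le 2) (Nat.pow_le_pow_right (by have := hq'.two_le; omega) hk)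
      omega)]
    exact harr0
  · rw [U' 1 (by
      intro x hx q k hxq hk h
      obtain ⟨q', hxq', hq', -⟩ := hPel x hx
      have hqq : q = q' := by rw [hxq] at hxq'; exact_mod_cast hxq'
      subst hqq
      have h4 : 4 ≤ q ^ k :=
        calc (4:Nat) = 2 ^ 2 := by norm_num
        _ ≤ q ^ k := le_trans (Nat.pow_le_pow_left hq'.two_le 2) (Nat.pow_le_pow_right (by have := hq'.two_le; omega) hk)
      omega)]
    exact harr1
  · intro q k hq hk hkN
    have hqN : q ≤ N := le_trans (le_trans (Nat.le_refl q) (by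
      calc q = q ^ 1 := (pow_one q).symm
      _ ≤ q ^ k := Nat.pow_le_pow_right (by have := hq.two_le; omega) hk)) hkN
    exact V' (q : Int) ((primesUpTo_mem N _).mpr ⟨q, rfl, hq, hqN⟩) q rfl k hk hkN

-- difference of A's point count and B's character sum, per element
theorem foldl_diff (f g : Int → Int → Int) (hfg : ∀ c s x, f c x - g s x = c - s + 1) :
    ∀ (xs : List Int) (c s : Int), xs.foldl f c - xs.foldl g s = c - s + xs.length := by
  intro xs
  induction xs with
  | nil => intro c s; simp
  | cons x xs ih =>
    intro c s
    rw [List.foldl_cons, List.foldl_cons, ih]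
    have := hfg c s x
    simp only [List.length_cons]
    push_cast
    omega

theorem apCharSum_eq (a_coeff b_coeff p : Int) (hp : 2 ≤ p) :
    apCharSum a_coeff b_coeff p = ellipticCurveAp a_coeff b_coeff p := by
  have hd := foldl_diff
    (fun count x =>
      if PySem.Int.mod (x * x * x + PySem.Int.mod a_coeff p * x + PySem.Int.mod b_coeff p) p = 0 then count + 1
      else if PySem.Int.powMod (PySem.Int.mod (x * x * x + PySem.Int.mod a_coeff p * x + PySem.Int.mod b_coeff p) p) (PySem.Int.floordiv (p - 1) 2).toNat p = 1 then count + 2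
      else count)
    (fun s x =>
      if PySem.Int.mod (x * x * x + PySem.Int.mod a_coeff p * x + PySem.Int.mod b_coeff p) p ≠ 0 then
        s + (if PySem.Int.powMod (PySem.Int.mod (x * x * x + PySem.Int.mod a_coeff p * x + PySem.Int.mod b_coeff p) p) (PySem.Int.floordiv (p - 1) 2).toNat p = 1 then 1 else -1)
      else s)
    (by
      intro c s x
      dsimp only
      by_cases h0 : PySem.Int.mod (x * x * x + PySem.Int.mod a_coeff p * x + PySem.Int.mod b_coeff p) p = 0
      · rw [if_pos h0, if_neg (by simp [h0])]
        ring
      · rw [if_neg h0, if_pos h0]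
        split_ifs <;> ring)
    (PySem.List.pyRange 0 p 1) 0 0
  have hlen : (((PySem.List.pyRange 0 p 1).length : Nat) : Int) = p := by
    rw [PySem.List.length_pyRange_one]; omega
  rw [hlen] at hd
  simp only [apCharSum, ellipticCurveAp]
  rw [if_neg (show ¬ p < 2 by omega)]
  omega

-- B's trial-division loop computes the smallest prime factor
theorem spfFind_aux (nN : Nat) (h2 : 2 ≤ nN) :
    ∀ (fuel : Nat) (p : Nat), 2 ≤ p → p ≤ nN → nN ≤ fuel + p →
      (∀ d : Nat, 2 ≤ d → d < p → ¬ d ∣ nN) →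
      ∃ qn : Nat, spfFind (nN:Int) (p:Int) fuel = (qn:Int) ∧ 2 ≤ qn ∧
        (∀ d : Nat, 2 ≤ d → d < qn → ¬ d ∣ nN) ∧ (nN < qn * qn ∨ qn ∣ nN) := by
  intro fuel
  induction fuel with
  | zero =>
    intro p hp2 hpn hf hnd
    have hpe : p = nN := by omega
    exact ⟨p, rfl, hp2, hnd, Or.inr (hpe ▸ dvd_rfl)⟩
  | succ fuel ih =>
    intro p hp2 hpn hf hnd
    rw [spfFind]
    by_cases hc : (p:Int) * p ≤ (nN:Int) ∧ PySem.Int.mod (nN:Int) (p:Int) ≠ 0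
    · rw [if_pos hc]
      have hpp : p * p ≤ nN := by exact_mod_cast hc.1
      have hnd' : ¬ p ∣ nN := by
        intro h
        exact hc.2 (by rw [PySem.Int.mod_eq_zero_iff_dvd]; exact_mod_cast h)
      have hplt : p < nN := by
        rcases Nat.lt_or_ge p nN with h | h
        · exact h
        · have : p = nN := by omega
          exact absurd (this ▸ dvd_rfl) hnd'
      have hcast : (p:Int) + 1 = ((p + 1 : Nat) : Int) := by push_cast; ring
      rw [hcast]
      exact ih (p + 1) (by omega) (by omega) (by omega)
        (by
          intro d hd1 hd2
          by_cases hdp : d < p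
          · exact hnd d hd1 hdp
          · have : d = p := by omega
            subst this
            exact hnd')
    · rw [if_neg hc]
      refine ⟨p, rfl, hp2, hnd, ?_⟩
      by_cases hA : (p:Int) * p ≤ (nN:Int)
      · right
        have hB : PySem.Int.mod (nN:Int) (p:Int) = 0 := by
          by_contra h
          exact hc ⟨hA, h⟩
        rw [PySem.Int.mod_eq_zero_iff_dvd] at hB
        exact_mod_cast hB
      · left
        have : (nN:Int) < (p:Int) * p := by omega
        exact_mod_cast this

theorem spfFind_minFac (nN : Nat) (h2 : 2 ≤ nN) :
    (if spfFind (nN:Int) 2 nN * spfFind (nN:Int) 2 nN > (nN:Int) then (nN:Int)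
     else spfFind (nN:Int) 2 nN) = (nN.minFac : Int) := by
  obtain ⟨qn, he, hq2, hnd, hor⟩ := spfFind_aux nN h2 nN 2 le_rfl h2 (by omega)
    (fun d hd1 hd2 => by omega)
  push_cast at he
  rw [he]
  have hmf_dvd := Nat.minFac_dvd nN
  have hmfp := Nat.minFac_prime (by omega : nN ≠ 1)
  have hmf2 := hmfp.two_le
  have hge : qn ≤ nN.minFac := by
    by_contra h
    push_neg at h
    exact hnd nN.minFac hmf2 h hmf_dvd
  rcases hor with hlt | hdvd
  · have hprime : nN.Prime := by
      by_contra hnp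
      have hsq := Nat.minFac_sq_le_self (by omega : 0 < nN) hnp
      have : nN.minFac ^ 2 ≤ nN := hsq
      nlinarith [hge, sq_nonneg nN.minFac]
    have hmfeq : nN.minFac = nN := by
      rcases hprime.eq_one_or_self_of_dvd _ hmf_dvd with h | h
      · omega
      · exact h
    rw [if_pos (by exact_mod_cast hlt), hmfeq]
  · have hle' : nN.minFac ≤ qn := Nat.minFac_le_of_dvd hq2 hdvd
    have hqeq : qn = nN.minFac := by omega
    by_cases hbig : (qn:Int) * qn > (nN:Int)
    · rw [if_pos hbig]
      have hnlt : nN < qn * qn := by exact_mod_cast hbig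
      have hprime : nN.Prime := by
        by_contra hnp
        have hsq := Nat.minFac_sq_le_self (by omega : 0 < nN) hnp
        have h1 : nN.minFac ^ 2 ≤ nN := hsq
        nlinarith [hqeq, h1]
      rcases hprime.eq_one_or_self_of_dvd _ hmf_dvd with h | h
      · omega
      · exact_mod_cast congrArg (Nat.cast : Nat → Int) h.symm
    · rw [if_neg hbig]
      exact_mod_cast congrArg (Nat.cast : Nat → Int) hqeq

-- B's result, characterised the same way as A's
theorem bpass (a_coeff b_coeff : Int) (N : Nat) (hN : 1 ≤ N) :
    (l_series_coefficients_alt a_coeff b_coeff (N : Int)).length = N + 1 ∧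
    ∀ m : Nat, m ≤ N → (l_series_coefficients_alt a_coeff b_coeff (N : Int)).getD m 0 =
      (if 2 ≤ m then Fc ((baseFill a_coeff b_coeff (N : Int) (primesUpTo (N : Int))).2) m
       else ((baseFill a_coeff b_coeff (N : Int) (primesUpTo (N : Int))).2).getD m 0) := by
  set a0 := (baseFill a_coeff b_coeff (N : Int) (primesUpTo (N : Int))).2 with ha0
  obtain ⟨hz, ho, hpp⟩ := baseFill_props a_coeff b_coeff N hN
  rw [← ha0] at hz ho hpp
  have hFcpow : ∀ q k : Nat, q.Prime → 1 ≤ k → q ^ k ≤ N →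
      Fc a0 (q ^ k) = Erec (q:Int) (ellipticCurveAp a_coeff b_coeff (q:Int)) k := by
    intro q k h1 h2 h3
    rw [Fc_pp a0 _ ⟨q, k, h1, h2, rfl⟩]
    exact hpp q k h1 h2 h3
  have hfold : l_series_coefficients_alt a_coeff b_coeff (N : Int) =
      (PySem.List.pyRange 2 ((N : Int) + 1) 1).foldl (fun a n =>
      a.set n.toNat
        (if (bStrip (if spfFind n 2 n.toNat * spfFind n 2 n.toNat > n then n else spfFind n 2 n.toNat)
              (if spfFind n 2 n.toNat * spfFind n 2 n.toNat > n then n else spfFind n 2 n.toNat)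
              (PySem.Int.floordiv n (if spfFind n 2 n.toNat * spfFind n 2 n.toNat > n then n else spfFind n 2 n.toNat)) N).2 > 1
         then a.getD (bStrip (if spfFind n 2 n.toNat * spfFind n 2 n.toNat > n then n else spfFind n 2 n.toNat)
              (if spfFind n 2 n.toNat * spfFind n 2 n.toNat > n then n else spfFind n 2 n.toNat)
              (PySem.Int.floordiv n (if spfFind n 2 n.toNat * spfFind n 2 n.toNat > n then n else spfFind n 2 n.toNat)) N).1.toNat 0
            * a.getD (bStrip (if spfFind n 2 n.toNat * spfFind n 2 n.toNat > n then n else spfFind n 2 n.toNat)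
              (if spfFind n 2 n.toNat * spfFind n 2 n.toNat > n then n else spfFind n 2 n.toNat)
              (PySem.Int.floordiv n (if spfFind n 2 n.toNat * spfFind n 2 n.toNat > n then n else spfFind n 2 n.toNat)) N).2.toNat 0
         else if (bStrip (if spfFind n 2 n.toNat * spfFind n 2 n.toNat > n then n else spfFind n 2 n.toNat)
              (if spfFind n 2 n.toNat * spfFind n 2 n.toNat > n then n else spfFind n 2 n.toNat)
              (PySem.Int.floordiv n (if spfFind n 2 n.toNat * spfFind n 2 n.toNat > n then n else spfFind n 2 n.toNat)) N).1
            = (if spfFind n 2 n.toNat * spfFind n 2 n.toNat > n then n else spfFind n 2 n.toNat)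
         then apCharSum a_coeff b_coeff (if spfFind n 2 n.toNat * spfFind n 2 n.toNat > n then n else spfFind n 2 n.toNat)
         else a.getD (if spfFind n 2 n.toNat * spfFind n 2 n.toNat > n then n else spfFind n 2 n.toNat).toNat 0
                * a.getD (PySem.Int.floordiv n (if spfFind n 2 n.toNat * spfFind n 2 n.toNat > n then n else spfFind n 2 n.toNat)).toNat 0
              - (if spfFind n 2 n.toNat * spfFind n 2 n.toNat > n then n else spfFind n 2 n.toNat)
                * a.getD (PySem.Int.floordiv n ((if spfFind n 2 n.toNat * spfFind n 2 n.toNat > n then n else spfFind n 2 n.toNat)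
                    * (if spfFind n 2 n.toNat * spfFind n 2 n.toNat > n then n else spfFind n 2 n.toNat))).toNat 0)) ((List.replicate (N + 1) (0:Int)).set 1 1) := by
    rw [l_series_coefficients_alt]
    simp only [Int.toNat_natCast]
    rfl
  rw [hfold]
  set init := (List.replicate (N + 1) (0:Int)).set 1 1 with hinit
  have hinitlen : init.length = N + 1 := by rw [hinit]; simp
  have hinit1 : init.getD 1 0 = 1 := getD_set_self _ _ _ (by simp only [List.length_replicate]; omega)
  have hinit0 : init.getD 0 0 = 0 := by
    rw [hinit, getD_set_ne _ _ _ _ (by omega)]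
    simp [List.getD_eq_getElem?_getD, List.getElem?_replicate]
  have hInv := pyRange_foldl_ind (fun a n =>
      a.set n.toNat
        (if (bStrip (if spfFind n 2 n.toNat * spfFind n 2 n.toNat > n then n else spfFind n 2 n.toNat)
              (if spfFind n 2 n.toNat * spfFind n 2 n.toNat > n then n else spfFind n 2 n.toNat)
              (PySem.Int.floordiv n (if spfFind n 2 n.toNat * spfFind n 2 n.toNat > n then n else spfFind n 2 n.toNat)) N).2 > 1
         then a.getD (bStrip (if spfFind n 2 n.toNat * spfFind n 2 n.toNat > n then n else spfFind n 2 n.toNat)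
              (if spfFind n 2 n.toNat * spfFind n 2 n.toNat > n then n else spfFind n 2 n.toNat)
              (PySem.Int.floordiv n (if spfFind n 2 n.toNat * spfFind n 2 n.toNat > n then n else spfFind n 2 n.toNat)) N).1.toNat 0
            * a.getD (bStrip (if spfFind n 2 n.toNat * spfFind n 2 n.toNat > n then n else spfFind n 2 n.toNat)
              (if spfFind n 2 n.toNat * spfFind n 2 n.toNat > n then n else spfFind n 2 n.toNat)
              (PySem.Int.floordiv n (if spfFind n 2 n.toNat * spfFind n 2 n.toNat > n then n else spfFind n 2 n.toNat)) N).2.toNat 0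
         else if (bStrip (if spfFind n 2 n.toNat * spfFind n 2 n.toNat > n then n else spfFind n 2 n.toNat)
              (if spfFind n 2 n.toNat * spfFind n 2 n.toNat > n then n else spfFind n 2 n.toNat)
              (PySem.Int.floordiv n (if spfFind n 2 n.toNat * spfFind n 2 n.toNat > n then n else spfFind n 2 n.toNat)) N).1
            = (if spfFind n 2 n.toNat * spfFind n 2 n.toNat > n then n else spfFind n 2 n.toNat)
         then apCharSum a_coeff b_coeff (if spfFind n 2 n.toNat * spfFind n 2 n.toNat > n then n else spfFind n 2 n.toNat)
         else a.getD (if spfFind n 2 n.toNat * spfFind n 2 n.toNat > n then n else spfFind n 2 n.toNat).toNat 0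
                * a.getD (PySem.Int.floordiv n (if spfFind n 2 n.toNat * spfFind n 2 n.toNat > n then n else spfFind n 2 n.toNat)).toNat 0
              - (if spfFind n 2 n.toNat * spfFind n 2 n.toNat > n then n else spfFind n 2 n.toNat)
                * a.getD (PySem.Int.floordiv n ((if spfFind n 2 n.toNat * spfFind n 2 n.toNat > n then n else spfFind n 2 n.toNat)
                    * (if spfFind n 2 n.toNat * spfFind n 2 n.toNat > n then n else spfFind n 2 n.toNat))).toNat 0)) 2
      (fun j arr => arr.length = N + 1 ∧ ∀ m : Nat, m ≤ N →
        arr.getD m 0 = if 2 ≤ m ∧ (m : Int) < j then Fc a0 m else init.getD m 0)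
      ((N : Int) + 1) init (by omega) ⟨hinitlen, ?base⟩ ?step
  case base =>
    intro m hm
    rw [if_neg (by omega)]
  case step =>
    intro j arr hj1 hj2 hIv
    obtain ⟨hlen, hinv⟩ := hIv
    set nN := j.toNat with hnNdef
    have hjcast : (nN : Int) = j := by omega
    have hnN2 : 2 ≤ nN := by omega
    have hnNle : nN ≤ N := by omega
    set q := nN.minFac with hq'
    have hq : q.Prime := Nat.minFac_prime (by omega)
    have hqd : q ∣ nN := Nat.minFac_dvd nN
    have hq2 : 2 ≤ q := hq.two_le
    have hqle : q ≤ nN := Nat.le_of_dvd (by omega) hqd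
    have hspf : (if spfFind j 2 j.toNat * spfFind j 2 j.toNat > j then j else spfFind j 2 j.toNat)
        = ((q : Nat) : Int) := by
      rw [← hjcast, Int.toNat_natCast]
      exact spfFind_minFac nN hnN2
    have hstrip : bStrip ((q:Nat):Int) ((q:Nat):Int) (PySem.Int.floordiv j ((q:Nat):Int)) N
        = (((pstrip q nN).1 : Int), ((pstrip q nN).2 : Int)) := by
      rw [← hjcast, PySem.Int.floordiv_natCast]
      have h1 : 1 ≤ nN / q := Nat.div_pos hqle (by omega)
      have h2 : nN / q ≤ N := le_trans (Nat.div_le_self _ _) hnNle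
      rw [bStrip_eq q hq2 N (nN / q) (q:Int) h1 h2]
      conv_rhs => rw [pstrip]
      rw [dif_pos ⟨hq2, hqd, by omega⟩]
      simp only
      push_cast
      ring_nf
    simp only [hspf, hstrip]
    rw [← hjcast]
    simp only [Int.toNat_natCast]
    set pk := (pstrip q nN).1 with hpk'
    set t2 := (pstrip q nN).2 with ht2'
    have hmul : pk * t2 = nN := pstrip_mul q nN
    obtain ⟨e, hpke, he1'⟩ := pstrip_fst_pow q nN hq2
    rw [← hpk'] at hpke
    have he1 : 1 ≤ e := he1' hqd (by omega)
    have hppk : IsPP pk := ⟨q, e, hq, he1, hpke⟩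
    have hpk2 : 2 ≤ pk := IsPP_two_le pk hppk
    have ht2pos : 1 ≤ t2 := Nat.pos_of_ne_zero (pstrip_snd_pos q nN (by omega))
    have hval : (if ((t2 : Nat) : Int) > 1 then arr.getD pk 0 * arr.getD t2 0
        else if ((pk : Nat) : Int) = ((q : Nat) : Int) then apCharSum a_coeff b_coeff ((q : Nat) : Int)
        else arr.getD q 0 * arr.getD (PySem.Int.floordiv ((nN : Nat) : Int) ((q : Nat) : Int)).toNat 0
             - ((q : Nat) : Int) * arr.getD (PySem.Int.floordiv ((nN : Nat) : Int) (((q : Nat) : Int) * ((q : Nat) : Int))).toNat 0)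
        = Fc a0 nN := by
      by_cases hcomp : 2 ≤ t2
      · rw [if_pos (by exact_mod_cast (show 1 < t2 by omega))]
        have hpklt : pk < nN := by nlinarith
        have ht2lt : t2 < nN := by nlinarith
        have hv1 : arr.getD pk 0 = Fc a0 pk := by
          rw [hinv pk (by omega), if_pos ⟨hpk2, by omega⟩]
        have hv2 : arr.getD t2 0 = Fc a0 t2 := by
          rw [hinv t2 (by omega), if_pos ⟨hcomp, by omega⟩]
        rw [hv1, hv2, Fc_step a0 nN hnN2, ← hq', ← hpk', ← ht2', Fc_pp a0 pk hppk]
      · have ht21 : t2 = 1 := by omega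
        rw [if_neg (by simp [ht21])]
        have hpkn : pk = nN := by rw [← hmul, ht21, mul_one]
        by_cases hpq : pk = q
        · rw [if_pos (by exact_mod_cast hpq)]
          have hnq : nN = q := by rw [← hpkn, hpq]
          rw [apCharSum_eq a_coeff b_coeff _ (by exact_mod_cast hq2)]
          have h1 := hpp q 1 hq le_rfl (by rw [pow_one]; omega)
          rw [pow_one] at h1
          rw [Fc_pp a0 nN ⟨q, 1, hq, le_rfl, by rw [pow_one]; exact hnq⟩, hnq, h1, Erec_one]
        · rw [if_neg (by
            intro h
            exact hpq (by exact_mod_cast h))]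
          have he2 : 2 ≤ e := by
            rcases Nat.lt_or_ge e 2 with h | h
            · interval_cases e
              · exact absurd (by rw [hpke, pow_one]) hpq
            · exact h
          have hne : nN = q ^ e := by rw [← hpkn, hpke]
          have ed1 : nN / q = q ^ (e - 1) := by
            rw [hne, (by rw [← pow_succ]; congr 1; omega : q ^ e = q ^ (e - 1) * q)]
            exact Nat.mul_div_cancel _ (by omega)
          have ed2 : nN / (q * q) = q ^ (e - 2) := by
            rw [hne, (by rw [← pow_add]; congr 1; omega : q ^ e = q ^ (e - 2) * (q ^ 2)), pow_two]
            exact Nat.mul_div_cancel _ (by positivity)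
          have hcast2 : ((q : Nat) : Int) * ((q : Nat) : Int) = ((q * q : Nat) : Int) := by push_cast; ring
          rw [hcast2, PySem.Int.floordiv_natCast, PySem.Int.floordiv_natCast, ed1, ed2]
          simp only [Int.toNat_natCast]
          have hqlt : q < nN := by
            rw [hne]
            calc q = q ^ 1 := (pow_one q).symm
            _ < q ^ e := Nat.pow_lt_pow_right (by omega) (by omega)
          have hv0 : arr.getD q 0 = ellipticCurveAp a_coeff b_coeff (q : Int) := by
            rw [hinv q (by omega), if_pos ⟨hq2, by omega⟩]
            have h1 := hFcpow q 1 hq le_rfl (by rw [pow_one]; omega)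
            rw [pow_one] at h1
            rw [h1, Erec_one]
          have hlt1 : q ^ (e - 1) < nN := by
            rw [hne]
            exact Nat.pow_lt_pow_right (by omega) (by omega)
          have hv1 : arr.getD (q ^ (e - 1)) 0 = Erec (q : Int) (ellipticCurveAp a_coeff b_coeff (q : Int)) (e - 1) := by
            have h2e : 2 ≤ q ^ (e - 1) := by
              calc 2 ≤ q := hq2
              _ = q ^ 1 := (pow_one q).symm
              _ ≤ q ^ (e - 1) := Nat.pow_le_pow_right (by omega) (by omega)
            rw [hinv (q ^ (e - 1)) (by omega), if_pos ⟨h2e, by omega⟩]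
            exact hFcpow q (e - 1) hq (by omega) (by omega)
          have hv2 : arr.getD (q ^ (e - 2)) 0 = Erec (q : Int) (ellipticCurveAp a_coeff b_coeff (q : Int)) (e - 2) := by
            by_cases he3 : e = 2
            · subst he3
              simp only [Nat.sub_self, pow_zero]
              rw [hinv 1 (by omega), if_neg (by omega), hinit1, Erec_zero]
            · have h2e : 2 ≤ q ^ (e - 2) := by
                calc 2 ≤ q := hq2
                _ = q ^ 1 := (pow_one q).symm
                _ ≤ q ^ (e - 2) := Nat.pow_le_pow_right (by omega) (by omega)
              have hlt2 : q ^ (e - 2) < nN := by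
                rw [hne]
                exact Nat.pow_lt_pow_right (by omega) (by omega)
              rw [hinv (q ^ (e - 2)) (by omega), if_pos ⟨h2e, by omega⟩]
              exact hFcpow q (e - 2) hq (by omega) (by omega)
          rw [hv0, hv1, hv2, Fc_pp a0 nN ⟨q, e, hq, he1, hne⟩, hne,
            hpp q e hq (by omega) (by rw [← hne]; omega),
            Erec_two_sub (q : Int) (ellipticCurveAp a_coeff b_coeff (q : Int)) e he2]
    rw [hval]
    refine ⟨by simpa using hlen, ?_⟩
    intro m hm
    by_cases hmn : m = nN
    · subst hmn
      rw [getD_set_self _ _ _ (by omega)]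
      rw [if_pos ⟨hnN2, by omega⟩]
    · rw [getD_set_ne _ _ _ _ (fun h => hmn h.symm), hinv m hm]
      by_cases hcj : 2 ≤ m ∧ (m : Int) < j
      · rw [if_pos hcj, if_pos ⟨hcj.1, by omega⟩]
      · rw [if_neg hcj, if_neg (by
          rintro ⟨h1, h2⟩
          have : (m : Int) < j := by
            rcases lt_or_eq_of_le (by omega : (m:Int) ≤ j) with h | h
            · exact h
            · exact absurd (by omega : m = nN) hmn
          exact hcj ⟨h1, this⟩)]
  obtain ⟨hlenf, hvf⟩ := hInv
  refine ⟨hlenf, ?_⟩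
  intro m hm
  rw [hvf m hm]
  by_cases h2m : 2 ≤ m
  · rw [if_pos ⟨h2m, by omega⟩, if_pos h2m]
  · rw [if_neg (by omega), if_neg h2m]
    interval_cases m
    · rw [hinit0, hz]
    · rw [hinit1, ho]

-- ===== VERDICT (by name: the statement is the Claim_ definition above) =====
theorem l_series_coefficients_spec : Claim_equal_l_series_coefficients := by
  intro a_coeff b_coeff num_terms hdom hpre
  unfold Spec_l_series_coefficients
  have hN : num_terms = ((num_terms.toNat : Nat) : Int) := by
    unfold Pre_l_series_coefficients at hpre
    omega
  set N := num_terms.toNat with hNdef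
  have hN1 : 1 ≤ N := by unfold Pre_l_series_coefficients at hpre; omega
  rw [hN]
  obtain ⟨hl1, hv1⟩ := apass a_coeff b_coeff N hN1
  obtain ⟨hl2, hv2⟩ := bpass a_coeff b_coeff N hN1
  refine List.ext_getElem (by rw [hl1, hl2]) ?_
  intro i h1 h2
  have hiN : i ≤ N := by rw [hl1] at h1; omega
  have e1 : (l_series_coefficients a_coeff b_coeff (N : Int))[i] =
      (l_series_coefficients a_coeff b_coeff (N : Int)).getD i 0 := by
    rw [List.getD_eq_getElem?_getD, List.getElem?_eq_getElem h1]
    rfl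
  have e2 : (l_series_coefficients_alt a_coeff b_coeff (N : Int))[i] =
      (l_series_coefficients_alt a_coeff b_coeff (N : Int)).getD i 0 := by
    rw [List.getD_eq_getElem?_getD, List.getElem?_eq_getElem h2]
    rfl
  rw [e1, e2, hv1 i hiN, hv2 i hiN]
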